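-- pv_equiv track=rewrite | github.com/JosephMarotte/MPRI-OptimizationHeuristics-Project | src/log_log.py | get_evaluations
-- ===== SOURCE A (Python) =====
-- def get_evaluations(a, b, log_k):
--     ans = []
--     for x in range(1 << log_k):
--         cur = 1
--         for i in range(log_k):
--             if (a >> i) & 1 and ((b >> i) & 1) == ((x >> i) & 1):
--                 cur = 0
--         ans.append(cur)
--     return ans
-- ===== SOURCE B (Python) =====
-- def get_evaluations(a, b, log_k):
--     size = 1 << log_k
--     m = a & (size - 1)          # a's mask restricted to the low log_k bits
--     t = m & ~b                  # required value of x & m: complement of b on a's bits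
--     return [1 if (x & m) == t else 0 for x in range(size)]
-- ===== Notes on version B (the rewrite author's own statement) =====
-- stated objective: alternative
-- what changed: replaces the per-x inner loop over all log_k bits by two bitmask constants (m = a masked to log_k bits, t = m & ~b) computed once, testing each x with a single (x & m) == t comparison; intended as an asymptotic win (O(2^log_k) vs O(2^log_k * log_k)) but a timing run could not confirm it since the output list of size 2^log_k dominates
import Mathlib
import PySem

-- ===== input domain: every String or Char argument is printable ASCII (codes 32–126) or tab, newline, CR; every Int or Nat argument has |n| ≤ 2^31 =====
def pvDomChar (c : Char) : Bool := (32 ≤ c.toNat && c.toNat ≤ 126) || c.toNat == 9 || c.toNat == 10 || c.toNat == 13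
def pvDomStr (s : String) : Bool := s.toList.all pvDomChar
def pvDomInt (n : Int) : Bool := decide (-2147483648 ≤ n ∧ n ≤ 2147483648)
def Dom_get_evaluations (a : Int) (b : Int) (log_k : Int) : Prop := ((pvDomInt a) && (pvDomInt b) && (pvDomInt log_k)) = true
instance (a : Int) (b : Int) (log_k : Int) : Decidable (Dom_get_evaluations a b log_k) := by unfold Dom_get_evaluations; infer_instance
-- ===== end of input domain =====

-- B computes the two masks m = a & (2^log_k - 1) and t = m & ~b once and tests each x with a
-- single (x & m) == t comparison, removing A's per-x inner loop over the log_k bits.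


-- ===== PORT A =====
-- (v >> i) & 1 : Python right shift is floor division by 2^i, and & 1 is mod 2 (both exact here)
def pyBit (v : Int) (i : Int) : Int :=
  PySem.Int.mod (PySem.Int.floordiv v ((2 : Int) ^ i.toNat)) 2

def get_evaluations (a : Int) (b : Int) (log_k : Int) : List Int :=
  (PySem.List.pyRange 0 ((2 : Int) ^ log_k.toNat) 1).foldl
    (fun ans x =>
      ans ++ [(PySem.List.pyRange 0 log_k 1).foldl
        (fun cur i => if pyBit a i ≠ 0 ∧ pyBit b i = pyBit x i then 0 else cur) 1])
    []

-- ===== PORT B =====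
def get_evaluations_alt (a : Int) (b : Int) (log_k : Int) : List Int :=
  let size : Int := (2 : Int) ^ log_k.toNat
  let m : Int := Int.land a (size - 1)
  let t : Int := Int.land m (Int.lnot b)
  (PySem.List.pyRange 0 size 1).map (fun x => if Int.land x m = t then 1 else 0)

-- ===== PRECONDITION & SPEC =====
-- Pre_ excludes exactly log_k < 0, on which Python's 1 << log_k raises ValueError.
def Pre_get_evaluations (a : Int) (b : Int) (log_k : Int) : Prop := 0 ≤ log_k
instance (a : Int) (b : Int) (log_k : Int) : Decidable (Pre_get_evaluations a b log_k) := by unfold Pre_get_evaluations; infer_instance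
def pvWitness_get_evaluations : Int × Int × Int := (5, 3, 2)

def Spec_get_evaluations (a : Int) (b : Int) (log_k : Int) (out : List Int) : Prop := out = get_evaluations_alt a b log_k
instance (a : Int) (b : Int) (log_k : Int) (out : List Int) : Decidable (Spec_get_evaluations a b log_k out) := by unfold Spec_get_evaluations; infer_instance

-- ===== CLAIM (what is proved, stated in full; the proofs are below) =====
def Claim_equal_get_evaluations : Prop := ∀ (a : Int) (b : Int) (log_k : Int), Dom_get_evaluations a b log_k → Pre_get_evaluations a b log_k → Spec_get_evaluations a b log_k (get_evaluations a b log_k)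

-- ===== LEMMAS AND PROOFS =====

theorem pyBit_eq_testBit (v : Int) (i : Nat) :
    pyBit v (i : Int) = if v.testBit i then 1 else 0 := by
  have h2 : (0:Int) < (2:Int) ^ (i:Int).toNat := by positivity
  unfold pyBit
  rw [PySem.Int.floordiv_eq_ediv_of_pos h2, PySem.Int.mod_eq_emod_of_pos (by norm_num)]
  have hcast : (2:Int) ^ (i:Int).toNat = ((2 ^ i : Nat) : Int) := by push_cast; simp
  rw [hcast, ← Int.shiftRight_eq_div_pow]
  cases v with
  | ofNat m =>
      have hs : (Int.ofNat m) >>> i = ((m >>> i : Nat) : Int) := (Int.natCast_shiftRight m i).symm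
      have ht : (Int.ofNat m).testBit i = decide ((m >>> i) % 2 = 1) :=
        (Nat.decide_shiftRight_mod_two_eq_one).symm
      rw [hs, ht]
      generalize (m >>> i) = k
      rcases Nat.mod_two_eq_zero_or_one k with h | h <;> simp [h] <;> omega
  | negSucc m =>
      rw [Int.negSucc_shiftRight]
      have ht : (Int.negSucc m).testBit i = !decide ((m >>> i) % 2 = 1) := by
        show (!m.testBit i) = _
        rw [← Nat.decide_shiftRight_mod_two_eq_one]
      rw [ht, Int.negSucc_eq]
      generalize (m >>> i) = k
      rcases Nat.mod_two_eq_zero_or_one k with h | h <;> simp [h] <;> omega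

theorem two_pow_bound (m k : Nat) : m < 2 ^ (max m k + 1) ∧ k < 2 ^ (max m k + 1) := by
  have h := @Nat.lt_two_pow_self (max m k + 1)
  omega

theorem int_eq_of_testBit_eq {u v : Int} (h : ∀ i, u.testBit i = v.testBit i) : u = v := by
  cases u with
  | ofNat m =>
    cases v with
    | ofNat k =>
        have : m = k := Nat.eq_of_testBit_eq (fun i => h i)
        simp [this]
    | negSucc k =>
        exfalso
        obtain ⟨hm, hk⟩ := two_pow_bound m k
        have hi := h (max m k + 1)
        simp only [Int.testBit] at hi
        rw [Nat.testBit_lt_two_pow hm, Nat.testBit_lt_two_pow hk] at hi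
        simp at hi
  | negSucc m =>
    cases v with
    | ofNat k =>
        exfalso
        obtain ⟨hm, hk⟩ := two_pow_bound m k
        have hi := h (max m k + 1)
        simp only [Int.testBit] at hi
        rw [Nat.testBit_lt_two_pow hm, Nat.testBit_lt_two_pow hk] at hi
        simp at hi
    | negSucc k =>
        have : m = k := Nat.eq_of_testBit_eq (fun i => by
          have := h i; simpa [Int.testBit] using this)
        simp [this]

theorem testBit_two_pow_sub_one_int (n i : Nat) :
    ((2 : Int) ^ n - 1).testBit i = decide (i < n) := by
  have h : ((2:Int) ^ n - 1) = ((2 ^ n - 1 : Nat) : Int) := by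
    have : (1:Nat) ≤ 2 ^ n := Nat.one_le_two_pow
    push_cast [this]; ring
  rw [h]
  show (2 ^ n - 1 : Nat).testBit i = _
  exact Nat.testBit_two_pow_sub_one n i

theorem foldl_flag_gen (P : Int → Prop) [DecidablePred P] (l : List Int) (s : Int) :
    (l.foldl (fun cur i => if P i then 0 else cur) s)
      = if ∃ i ∈ l, P i then 0 else s := by
  induction l generalizing s with
  | nil => simp
  | cons y ys ih =>
      simp only [List.foldl_cons, ih]
      by_cases hy : P y <;> simp [hy]

theorem key (a b x : Int) (n : Nat) :
    (∀ i ∈ PySem.List.pyRange 0 (n : Int) 1, ¬(pyBit a i ≠ 0 ∧ pyBit b i = pyBit x i)) ↔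
      Int.land x (Int.land a ((2:Int) ^ n - 1)) = Int.land (Int.land a ((2:Int) ^ n - 1)) (Int.lnot b) := by
  constructor
  · intro h
    apply int_eq_of_testBit_eq
    intro i
    simp only [Int.testBit_land, Int.testBit_lnot, testBit_two_pow_sub_one_int]
    by_cases hin : i < n
    · have hm := h (i : Int) (by
        rw [PySem.List.mem_pyRange_one]
        constructor <;> [positivity; exact_mod_cast hin])
      simp only [pyBit_eq_testBit] at hm
      cases hA : a.testBit i <;> cases hB : b.testBit i <;> cases hX : x.testBit i <;>
        simp_all
    · simp [hin]
  · intro heq i hi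
    rw [PySem.List.mem_pyRange_one] at hi
    obtain ⟨hi0, hin⟩ := hi
    obtain ⟨j, rfl⟩ : ∃ j : Nat, i = (j : Int) := ⟨i.toNat, (Int.toNat_of_nonneg hi0).symm⟩
    have hjn : j < n := by exact_mod_cast hin
    have hb := congrArg (fun z => z.testBit j) heq
    simp only at hb
    simp only [Int.testBit_land, Int.testBit_lnot, testBit_two_pow_sub_one_int] at hb
    simp only [pyBit_eq_testBit]
    cases hA : a.testBit j <;> cases hB : b.testBit j <;> cases hX : x.testBit j <;>
      simp_all

-- the outer foldl-append is a map
theorem foldl_append_map (g : Int → Int) (l : List Int) (acc : List Int) :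
    (l.foldl (fun ans x => ans ++ [g x]) acc) = acc ++ l.map g := by
  induction l generalizing acc with
  | nil => simp
  | cons y ys ih => simp [ih]

-- ===== VERDICT (by name: the statement is the Claim_ definition above) =====
theorem get_evaluations_spec : Claim_equal_get_evaluations := by
  intro a b log_k _ hpre
  have hlk : ((log_k.toNat : Nat) : Int) = log_k := Int.toNat_of_nonneg hpre
  unfold Spec_get_evaluations get_evaluations get_evaluations_alt
  rw [foldl_append_map _ _ []]
  rw [List.nil_append]
  refine List.map_congr_left (fun x _ => ?_)
  rw [foldl_flag_gen (fun i => pyBit a i ≠ 0 ∧ pyBit b i = pyBit x i)]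
  have hiff := key a b x log_k.toNat
  rw [hlk] at hiff
  by_cases hc : Int.land x (Int.land a ((2:Int) ^ log_k.toNat - 1)) =
      Int.land (Int.land a ((2:Int) ^ log_k.toNat - 1)) (Int.lnot b)
  · have hall := hiff.mpr hc
    rw [if_neg (by rintro ⟨i, hi, hp⟩; exact hall i hi hp), if_pos hc]
  · have hex : ∃ i ∈ PySem.List.pyRange 0 log_k 1, pyBit a i ≠ 0 ∧ pyBit b i = pyBit x i := by
      by_contra hno
      exact hc (hiff.mp (fun i hi hp => hno ⟨i, hi, hp⟩))
    rw [if_pos hex, if_neg hc]
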